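-- pv_equiv track=rewrite | github.com/pyu4277/Harness-AI-Workspace-Template | Projects/260415_document_analyzer/src/parsers/detect_print_pages.py | _pick_print_number
-- ===== SOURCE A (Python) =====
-- def _pick_print_number(cands: list[int],
--                        prev_print: int | None) -> int | None:
--     """후보 중 인쇄 번호를 선택. 직전+1 우선, 없으면 최빈/최소."""
--     if not cands:
--         return None
--     if prev_print is not None:
--         for c in cands:
--             if c == prev_print + 1:
--                 return c
--     counts: dict[int, int] = {}
--     for c in cands:
--         counts[c] = counts.get(c, 0) + 1
--     return max(counts, key=lambda k: (counts[k], -k))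
-- ===== SOURCE B (Python) =====
-- def _pick_print_number(cands: list[int],
--                        prev_print: int | None) -> int | None:
--     """Same choice rule, different fallback: sort ascending and scan runs,
--     keeping the first (= smallest) value of maximal run length."""
--     if not cands:
--         return None
--     if prev_print is not None and prev_print + 1 in cands:
--         return prev_print + 1
--     s = sorted(cands)
--     best_val, best_len = s[0], 0
--     cur_val, cur_len = s[0], 0
--     for v in s:
--         if v == cur_val:
--             cur_len += 1
--         else:
--             cur_val, cur_len = v, 1
--         if cur_len > best_len:
--             best_val, best_len = cur_val, cur_len
--     return best_val
-- ===== Notes on version B (the rewrite author's own statement) =====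
-- stated objective: alternative
-- what changed: The count-dict plus max-by-(count,-k) fallback is replaced by a sort-then-scan mode finder: sort the candidates ascending and scan runs of equal values once, updating the best only on a strict increase in run length so the smallest most-frequent value wins; the prev+1 search becomes a membership test.
import Mathlib
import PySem

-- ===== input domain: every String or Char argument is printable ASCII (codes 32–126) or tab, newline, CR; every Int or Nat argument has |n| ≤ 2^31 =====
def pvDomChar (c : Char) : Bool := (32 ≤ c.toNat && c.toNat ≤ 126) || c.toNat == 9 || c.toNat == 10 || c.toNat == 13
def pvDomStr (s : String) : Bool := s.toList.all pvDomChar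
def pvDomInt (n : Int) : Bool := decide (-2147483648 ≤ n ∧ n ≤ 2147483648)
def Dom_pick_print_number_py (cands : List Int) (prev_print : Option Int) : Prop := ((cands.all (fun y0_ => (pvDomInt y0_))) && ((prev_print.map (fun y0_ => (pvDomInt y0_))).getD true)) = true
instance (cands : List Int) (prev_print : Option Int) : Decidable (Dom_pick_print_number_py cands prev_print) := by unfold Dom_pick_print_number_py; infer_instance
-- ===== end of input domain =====

-- B replaces A's count-dict + max-by-(count,-k) fallback with a sort-then-scan run-length
-- mode finder (smallest value wins ties via strict '>' over the ascending sort); same results.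

-- ===== PORT A =====
def pick_print_number_py (cands : List Int) (prev_print : Option Int) : Option Int :=
  if cands = [] then none
  else
    match (match prev_print with
           | some p => cands.find? (fun c => c == p + 1)
           | none => none) with
    | some c => some c
    | none =>
      let counts := cands.foldl (fun d c => d.insert c (d.getD c 0 + 1)) (PySem.Dict.empty : PySem.Dict Int Int)
      PySem.List.max2? counts.keys (fun k => counts.getD k 0) (fun k => -k)

-- ===== PORT B =====
-- Source B's loop body: state is (best_val, best_len, cur_val, cur_len)
def pppStep (st : Int × Int × Int × Int) (v : Int) : Int × Int × Int × Int :=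
  let cur := if v = st.2.2.1 then (st.2.2.1, st.2.2.2 + 1) else (v, (1 : Int))
  if st.2.1 < cur.2 then (cur.1, cur.2, cur.1, cur.2) else (st.1, st.2.1, cur.1, cur.2)

-- Source B's fallback: sort ascending, scan runs, best updated on strict increase only
def pppFallback (cands : List Int) : Option Int :=
  let s := PySem.List.sorted cands (fun x => x)
  match s with
  | [] => none   -- unreachable when cands ≠ [] (guard for totality only)
  | h :: _ => some ((s.foldl pppStep (h, (0 : Int), h, (0 : Int))).1)

def pick_print_number_py_alt (cands : List Int) (prev_print : Option Int) : Option Int :=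
  if cands = [] then none
  else
    match prev_print with
    | some p => if p + 1 ∈ cands then some (p + 1) else pppFallback cands
    | none => pppFallback cands

-- ===== PRECONDITION & SPEC =====
def Spec_pick_print_number_py (cands : List Int) (prev_print : Option Int) (out : Option Int) : Prop := out = pick_print_number_py_alt cands prev_print
instance (cands : List Int) (prev_print : Option Int) (out : Option Int) : Decidable (Spec_pick_print_number_py cands prev_print out) := by unfold Spec_pick_print_number_py; infer_instance

-- ===== CLAIM (what is proved, stated in full; the proofs are below) =====
def Claim_equal_pick_print_number_py : Prop := ∀ (cands : List Int) (prev_print : Option Int), Dom_pick_print_number_py cands prev_print → Spec_pick_print_number_py cands prev_print (pick_print_number_py cands prev_print)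

-- ===== LEMMAS AND PROOFS =====

-- A-side: the fold inside max2? with second key (-·), written out
def pvStep (f : Int → Int) (acc : Option Int) (x : Int) : Option Int :=
  match acc with
  | none => some x
  | some m => if (decide (f m < f x) || !decide (f x < f m) && decide (-m < -x)) = true then some x else some m

theorem pv_max2_eq_foldl (f : Int → Int) (ks : List Int) :
    PySem.List.max2? ks f (fun k => -k) = ks.foldl (pvStep f) none := by
  unfold PySem.List.max2?
  congr 1
  funext acc x
  cases acc <;> rfl

-- invariant of the fold: the accumulator is the (f ·, -·)-lexicographic max so far
theorem pv_max2_aux (f : Int → Int) :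
    ∀ (l : List Int) (a m : Int),
      l.foldl (pvStep f) (some a) = some m →
      (m = a ∨ m ∈ l) ∧ (f a < f m ∨ (f a = f m ∧ m ≤ a)) ∧
        (∀ y ∈ l, f y < f m ∨ (f y = f m ∧ m ≤ y)) := by
  intro l
  induction l with
  | nil =>
      intro a m h
      simp only [List.foldl_nil, Option.some.injEq] at h
      subst h
      exact ⟨Or.inl rfl, Or.inr ⟨rfl, le_refl _⟩, by simp⟩
  | cons x t ih =>
      intro a m h
      rw [List.foldl_cons] at h
      replace h : t.foldl (pvStep f)
          (if (decide (f a < f x) || !decide (f x < f a) && decide (-a < -x)) = true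
           then some x else some a) = some m := h
      by_cases hcond : (decide (f a < f x) || !decide (f x < f a) && decide (-a < -x)) = true
      · rw [if_pos hcond] at h
        obtain ⟨hm, hax, hall⟩ := ih x m h
        simp only [decide_eq_true_eq, Bool.or_eq_true, Bool.and_eq_true, Bool.not_eq_true',
          decide_eq_false_iff_not] at hcond
        refine ⟨?_, ?_, ?_⟩
        · rcases hm with h1 | h1
          · exact Or.inr (by simp [h1])
          · exact Or.inr (List.mem_cons_of_mem _ h1)
        · rcases hcond with h1 | ⟨h1, h2⟩ <;> rcases hax with h3 | ⟨h3, h4⟩ <;> omega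
        · intro y hy
          rcases List.mem_cons.mp hy with h1 | h1
          · subst h1; exact hax
          · exact hall y h1
      · rw [if_neg hcond] at h
        obtain ⟨hm, hax, hall⟩ := ih a m h
        simp only [decide_eq_true_eq, Bool.or_eq_true, Bool.and_eq_true, Bool.not_eq_true',
          decide_eq_false_iff_not, not_or, not_and] at hcond
        refine ⟨?_, hax, ?_⟩
        · rcases hm with h1 | h1
          · exact Or.inl h1
          · exact Or.inr (List.mem_cons_of_mem _ h1)
        · intro y hy
          rcases List.mem_cons.mp hy with h1 | h1
          · subst h1
            obtain ⟨h1, h2⟩ := hcond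
            by_cases h5 : f y < f a
            · rcases hax with h3 | ⟨h3, h4⟩ <;> omega
            · have h6 := h2 h5
              rcases hax with h3 | ⟨h3, h4⟩ <;> omega
          · exact hall y h1

theorem pv_foldl_some (f : Int → Int) :
    ∀ (t : List Int) (a : Int), ∃ m, t.foldl (pvStep f) (some a) = some m := by
  intro t
  induction t with
  | nil => intro a; exact ⟨a, rfl⟩
  | cons x t ih =>
      intro a
      rw [List.foldl_cons]
      have hstep : pvStep f (some a) x =
          if (decide (f a < f x) || !decide (f x < f a) && decide (-a < -x)) = true
          then some x else some a := rfl
      rw [hstep]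
      split
      · exact ih x
      · exact ih a

theorem pv_max2_spec (f : Int → Int) (ks : List Int) (hne : ks ≠ []) :
    ∃ m, PySem.List.max2? ks f (fun k => -k) = some m ∧ m ∈ ks ∧
      ∀ y ∈ ks, f y < f m ∨ (f y = f m ∧ m ≤ y) := by
  cases ks with
  | nil => exact absurd rfl hne
  | cons k t =>
      rw [pv_max2_eq_foldl]
      rw [List.foldl_cons]
      obtain ⟨m, hm⟩ := pv_foldl_some f t k
      have hstep : pvStep f none k = some k := rfl
      rw [hstep]
      obtain ⟨h1, h2, h3⟩ := pv_max2_aux f t k m hm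
      refine ⟨m, hm, ?_, ?_⟩
      · rcases h1 with h1 | h1
        · simp [h1]
        · exact List.mem_cons_of_mem _ h1
      · intro y hy
        rcases List.mem_cons.mp hy with h1 | h1
        · subst h1; exact h2
        · exact h3 y h1

-- uniqueness of the "most frequent, smallest" element
theorem pv_arg_unique (cands : List Int) (m1 m2 : Int)
    (h1m : m1 ∈ cands) (h2m : m2 ∈ cands)
    (h1 : ∀ y ∈ cands, (cands.count y : Int) < (cands.count m1 : Int) ∨ ((cands.count y : Int) = (cands.count m1 : Int) ∧ m1 ≤ y))
    (h2 : ∀ y ∈ cands, (cands.count y : Int) < (cands.count m2 : Int) ∨ ((cands.count y : Int) = (cands.count m2 : Int) ∧ m2 ≤ y)) :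
    m1 = m2 := by
  have a := h1 m2 h2m
  have b := h2 m1 h1m
  omega

-- B-side: run-length scan invariant over the sorted list s = p ++ l,
-- state (bv, bl, cv, cl) correct for the processed prefix p
theorem pv_bfold_inv (s : List Int) (hs : s.Pairwise (fun a b => a ≤ b)) :
    ∀ (l p : List Int) (bv bl cv cl : Int),
      s = p ++ l →
      cl = (p.count cv : Int) →
      (p = [] ∨ (cv ∈ p ∧ ∀ x ∈ p, x ≤ cv)) →
      bl = (p.count bv : Int) →
      (p = [] ∨ bv ∈ p) →
      (∀ y ∈ p, ((p.count y : Int) < bl ∨ ((p.count y : Int) = bl ∧ bv ≤ y))) →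
      ∀ res, l.foldl pppStep (bv, bl, cv, cl) = res →
      (s = [] ∨ res.1 ∈ s) ∧
      ∀ y ∈ s, ((s.count y : Int) < (s.count res.1 : Int) ∨
        ((s.count y : Int) = (s.count res.1 : Int) ∧ res.1 ≤ y)) := by
  intro l
  induction l with
  | nil =>
      intro p bv bl cv cl hsp hcl hcv hbl hbv hbest res hres
      simp only [List.foldl_nil] at hres
      subst hres
      simp only [List.append_nil] at hsp
      subst hsp
      have hfst : ((bv, bl, cv, cl) : Int × Int × Int × Int).1 = bv := rfl
      rw [hfst]
      refine ⟨?_, ?_⟩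
      · rcases hbv with h | h
        · exact Or.inl h
        · exact Or.inr h
      · intro y hy
        have := hbest y hy
        omega
  | cons v l' ih =>
      intro p bv bl cv cl hsp hcl hcv hbl hbv hbest res hres
      rw [List.foldl_cons] at hres
      have hs' : (p ++ v :: l').Pairwise (fun a b => a ≤ b) := hsp ▸ hs
      have hxv : ∀ x ∈ p, x ≤ v := by
        intro x hx
        exact (List.pairwise_append.mp hs').2.2 x hx v List.mem_cons_self
      have hsp' : s = (p ++ [v]) ++ l' := by simp [hsp]
      have hcnt : ∀ y : Int, ((p ++ [v]).count y : Int) =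
          (p.count y : Int) + (if y = v then 1 else 0) := by
        intro y
        rw [List.count_append]
        by_cases h : y = v <;> simp [h, List.count_singleton] <;> try omega
      have hcntp_le : ∀ y ∈ p, (p.count y : Int) ≤ bl := by
        intro y hy; have := hbest y hy; omega
      have hmem' : ∀ y, y ∈ p ++ [v] → y ∈ p ∨ y = v := by
        intro y hy
        rcases List.mem_append.mp hy with h | h
        · exact Or.inl h
        · exact Or.inr (by simpa using h)
      by_cases hvc : v = cv
      · -- the run continues
        subst hvc
        have hcl' : cl + 1 = ((p ++ [v]).count v : Int) := by
          rw [hcnt v, if_pos rfl]; omega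
        have hcv' : (p ++ [v] = []) ∨ (v ∈ p ++ [v] ∧ ∀ x ∈ p ++ [v], x ≤ v) := by
          refine Or.inr ⟨by simp, ?_⟩
          intro x hx
          rcases hmem' x hx with h | h
          · exact hxv x h
          · omega
        by_cases hup : bl < cl + 1
        · have hstep : pppStep (bv, bl, v, cl) v = (v, cl + 1, v, cl + 1) := by
            simp [pppStep, hup]
          rw [hstep] at hres
          refine ih (p ++ [v]) v (cl + 1) v (cl + 1) hsp' hcl' hcv' hcl'
            (Or.inr (by simp)) ?_ res hres
          intro y hy
          by_cases hyv : y = v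
          · subst hyv; right; exact ⟨hcl'.symm, le_refl _⟩
          · rcases hmem' y hy with h | h
            · have h1 := hcntp_le y h
              rw [hcnt y, if_neg hyv]
              left; omega
            · exact absurd h hyv
        · have hstep : pppStep (bv, bl, v, cl) v = (bv, bl, v, cl + 1) := by
            simp [pppStep, hup]
          rw [hstep] at hres
          have hpne : p ≠ [] := by
            intro hp; subst hp
            simp at hbl hcl
            omega
          have hbvp : bv ∈ p := hbv.resolve_left hpne
          have hbv_ne : bv ≠ v := by
            intro hh; rw [hh] at hbl; omega
          have hbl' : bl = ((p ++ [v]).count bv : Int) := by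
            rw [hcnt bv, if_neg hbv_ne]; omega
          refine ih (p ++ [v]) bv bl v (cl + 1) hsp' hcl' hcv' hbl'
            (Or.inr (List.mem_append.mpr (Or.inl hbvp))) ?_ res hres
          intro y hy
          by_cases hyv : y = v
          · subst hyv
            rw [hcnt y, if_pos rfl]
            have hbvle : bv ≤ y := (hcv.resolve_left hpne).2 bv hbvp
            omega
          · rcases hmem' y hy with h | h
            · have := hbest y h
              rw [hcnt y, if_neg hyv]
              omega
            · exact absurd h hyv
      · -- a new run starts: v has not been seen
        have hvnp : v ∉ p := by
          intro hv
          have hpne : p ≠ [] := fun hh => by subst hh; simp at hv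
          have h2 := hcv.resolve_left hpne
          exact hvc (le_antisymm (h2.2 v hv) (hxv cv h2.1))
        have hvcnt0 : p.count v = 0 := List.count_eq_zero_of_not_mem hvnp
        have hcl' : (1 : Int) = ((p ++ [v]).count v : Int) := by
          rw [hcnt v, if_pos rfl, hvcnt0]; simp
        have hcv' : (p ++ [v] = []) ∨ (v ∈ p ++ [v] ∧ ∀ x ∈ p ++ [v], x ≤ v) := by
          refine Or.inr ⟨by simp, ?_⟩
          intro x hx
          rcases hmem' x hx with h | h
          · exact hxv x h
          · omega
        by_cases hup : bl < 1
        · have hstep : pppStep (bv, bl, cv, cl) v = (v, 1, v, 1) := by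
            simp [pppStep, hvc, hup]
          rw [hstep] at hres
          refine ih (p ++ [v]) v 1 v 1 hsp' hcl' hcv' hcl' (Or.inr (by simp)) ?_ res hres
          intro y hy
          by_cases hyv : y = v
          · subst hyv; right; exact ⟨hcl'.symm, le_refl _⟩
          · rcases hmem' y hy with h | h
            · have h1 := hcntp_le y h
              rw [hcnt y, if_neg hyv]
              left; omega
            · exact absurd h hyv
        · have hstep : pppStep (bv, bl, cv, cl) v = (bv, bl, v, 1) := by
            simp [pppStep, hvc, hup]
          rw [hstep] at hres
          have hpne : p ≠ [] := by
            intro hp; subst hp; simp at hbl; omega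
          have hbvp : bv ∈ p := hbv.resolve_left hpne
          have hbv_ne : bv ≠ v := fun hh => hvnp (hh ▸ hbvp)
          have hbl' : bl = ((p ++ [v]).count bv : Int) := by
            rw [hcnt bv, if_neg hbv_ne]; omega
          refine ih (p ++ [v]) bv bl v 1 hsp' hcl' hcv' hbl'
            (Or.inr (List.mem_append.mpr (Or.inl hbvp))) ?_ res hres
          intro y hy
          by_cases hyv : y = v
          · subst hyv
            rw [hcnt y, if_pos rfl, hvcnt0]
            have hbvle : bv ≤ y := hxv bv hbvp
            simp only [Nat.cast_zero]
            omega
          · rcases hmem' y hy with h | h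
            · have := hbest y h
              rw [hcnt y, if_neg hyv]
              omega
            · exact absurd h hyv

-- B's fallback returns the most frequent candidate, smallest on ties
theorem pv_fallback_char (cands : List Int) (hne : cands ≠ []) :
    ∃ m, pppFallback cands = some m ∧ m ∈ cands ∧
      ∀ y ∈ cands, (cands.count y : Int) < (cands.count m : Int) ∨
        ((cands.count y : Int) = (cands.count m : Int) ∧ m ≤ y) := by
  cases hsrt : PySem.List.sorted cands (fun x => x) with
  | nil =>
      exfalso
      have hperm := PySem.List.sorted_perm cands (fun x => x) false
      rw [hsrt] at hperm
      exact hne hperm.symm.eq_nil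
  | cons h t =>
      have hperm := PySem.List.sorted_perm cands (fun x => x) false
      have hpw := PySem.List.sorted_pairwise cands (fun x => x)
      rw [hsrt] at hperm hpw
      have hpp : pppFallback cands = some (((h :: t).foldl pppStep (h, (0 : Int), h, (0 : Int))).1) := by
        unfold pppFallback
        rw [hsrt]
      obtain ⟨hmem, hprop⟩ := pv_bfold_inv (h :: t) hpw (h :: t) [] h 0 h 0 (by simp)
        (by simp) (Or.inl rfl) (by simp) (Or.inl rfl) (by simp)
        ((h :: t).foldl pppStep (h, (0 : Int), h, (0 : Int))) rfl
      have hsne : (h :: t) ≠ ([] : List Int) := by simp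
      refine ⟨_, hpp, ?_, ?_⟩
      · exact hperm.mem_iff.mp (hmem.resolve_left hsne)
      · intro y hy
        have hy' : y ∈ h :: t := hperm.mem_iff.mpr hy
        have hres := hprop y hy'
        rw [hperm.count_eq y, hperm.count_eq _] at hres
        exact hres

-- the two fallbacks agree
theorem pv_fallback_eq (cands : List Int) (hne : cands ≠ []) :
    PySem.List.max2?
      (cands.foldl (fun d c => d.insert c (d.getD c 0 + 1)) (PySem.Dict.empty : PySem.Dict Int Int)).keys
      (fun k => (cands.foldl (fun d c => d.insert c (d.getD c 0 + 1)) (PySem.Dict.empty : PySem.Dict Int Int)).getD k 0)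
      (fun k => -k)
    = pppFallback cands := by
  have hctr : (cands.foldl (fun d c => d.insert c (d.getD c 0 + 1)) (PySem.Dict.empty : PySem.Dict Int Int))
      = PySem.Dict.counter cands := by
    rw [PySem.Dict.counter_eq_foldl]
    rfl
  rw [hctr, PySem.Dict.keys_counter]
  have hksne : PySem.Set.ofList cands ≠ [] := by
    cases cands with
    | nil => exact absurd rfl hne
    | cons c t =>
        intro hh
        have hmem : c ∈ PySem.Set.ofList (c :: t) := (PySem.Set.mem_ofList _ _).mpr List.mem_cons_self
        rw [hh] at hmem
        simp at hmem
  obtain ⟨mA, hA, hAmem, hAprop⟩ :=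
    pv_max2_spec (fun k => (PySem.Dict.counter cands).getD k 0) (PySem.Set.ofList cands) hksne
  obtain ⟨mB, hB, hBmem, hBprop⟩ := pv_fallback_char cands hne
  rw [hA, hB]
  congr 1
  refine pv_arg_unique cands mA mB ((PySem.Set.mem_ofList _ _).mp hAmem) hBmem ?_ hBprop
  intro y hy
  have hAy := hAprop y ((PySem.Set.mem_ofList _ _).mpr hy)
  simpa [PySem.Dict.getD_counter] using hAy

-- A's prev+1 search loop is a membership test returning prev+1
theorem pv_find_succ (cands : List Int) (p : Int) :
    cands.find? (fun c => c == p + 1) = if p + 1 ∈ cands then some (p + 1) else none := by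
  induction cands with
  | nil => simp
  | cons c t ih =>
      by_cases hc : c = p + 1
      · subst hc; simp
      · rw [List.find?_cons_of_neg (by simp [hc]), ih]
        by_cases hm : p + 1 ∈ t
        · rw [if_pos hm, if_pos (List.mem_cons_of_mem _ hm)]
        · rw [if_neg hm, if_neg (by simp [hm, Ne.symm hc])]

-- ===== VERDICT (by name: the statement is the Claim_ definition above) =====
theorem pick_print_number_py_spec : Claim_equal_pick_print_number_py := by
  unfold Claim_equal_pick_print_number_py
  intro cands prev_print _
  unfold Spec_pick_print_number_py
  unfold pick_print_number_py pick_print_number_py_alt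
  by_cases hc : cands = []
  · simp [hc]
  · rw [if_neg hc, if_neg hc]
    cases prev_print with
    | none =>
        exact pv_fallback_eq cands hc
    | some p =>
        show (match cands.find? (fun c => c == p + 1) with
              | some c => some c
              | none =>
                let counts := cands.foldl (fun d c => d.insert c (d.getD c 0 + 1)) (PySem.Dict.empty : PySem.Dict Int Int)
                PySem.List.max2? counts.keys (fun k => counts.getD k 0) (fun k => -k))
            = (if p + 1 ∈ cands then some (p + 1) else pppFallback cands)
        rw [pv_find_succ]
        by_cases hm : p + 1 ∈ cands
        · rw [if_pos hm, if_pos hm]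
        · rw [if_neg hm, if_neg hm]
          exact pv_fallback_eq cands hc
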